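-- pv_equiv track=rewrite | github.com/spartan289/PycharmProjects | pythonProject/bob.py | maximumChars
-- ===== SOURCE A (Python) =====
-- MAX_CHAR = 256
--
-- def maximumChars(str1):
--     n = len(str1)
--     res = 0
--
--     firstInd = [-1 for i in range(MAX_CHAR)]
--
--     for i in range(n):
--         first_ind = firstInd[ord(str1[i])]
--
--         if (first_ind == -1):
--             firstInd[ord(str1[i])] = i
--
--
--         else:
--             res = max(res, abs(i - first_ind - 1))
--
--     return res
-- ===== SOURCE B (Python) =====
-- def maximumChars(str1):
--     res = 0
--     for c in dict.fromkeys(str1):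
--         pos = [i for i, x in enumerate(str1) if x == c]
--         res = max(res, pos[-1] - pos[0] - 1)
--     return res
-- ===== Notes on version B (the rewrite author's own statement) =====
-- stated objective: alternative
-- what changed: Replaces A's single table-driven pass (a 256-slot first-index array updated while the running maximum is folded in) by a per-character decomposition: for each distinct character, a fresh scan of the string collects its occurrence positions and the gap pos[-1]-pos[0]-1 enters the maximum; no index table exists in B.
import Mathlib
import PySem

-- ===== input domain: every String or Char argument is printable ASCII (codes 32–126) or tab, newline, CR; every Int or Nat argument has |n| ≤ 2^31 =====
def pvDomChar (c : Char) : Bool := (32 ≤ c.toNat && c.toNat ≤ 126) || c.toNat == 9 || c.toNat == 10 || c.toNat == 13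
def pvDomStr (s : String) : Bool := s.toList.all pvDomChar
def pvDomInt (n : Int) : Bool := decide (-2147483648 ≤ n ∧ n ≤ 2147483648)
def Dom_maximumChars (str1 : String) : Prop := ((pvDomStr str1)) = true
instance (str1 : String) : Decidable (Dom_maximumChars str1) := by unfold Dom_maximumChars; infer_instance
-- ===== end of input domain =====

-- B replaces A's single table-driven pass by a per-character decomposition: for each distinct
-- character, a fresh scan collects its occurrence positions and the gap pos[-1]-pos[0]-1 enters
-- the maximum (alternative algorithm, same results; not claimed faster).

-- ===== PORT A =====
-- the body of A's 'for i in range(n)' loop; state = (firstInd, res).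
-- Python's firstInd[ord(c)] / assignment raises IndexError only for ord(c) ≥ 256; on Dom_ every
-- code is ≤ 126 < 256, so List.getD / List.set are exact here.
def pvStepA (st : List Int × Int) (p : Int × Char) : List Int × Int :=
  let first_ind := st.1.getD p.2.toNat (-1)
  if first_ind = -1 then (st.1.set p.2.toNat p.1, st.2)
  else (st.1, max st.2 |p.1 - first_ind - 1|)

def maximumChars (str1 : String) : Int :=
  ((PySem.List.enumerate str1.toList 0).foldl pvStepA (List.replicate 256 (-1), 0)).2

-- ===== PORT B =====
-- pos = [i for i, x in enumerate(str1) if x == c]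
def pvPositions (l : List Char) (c : Char) : List Int :=
  (PySem.List.enumerate l 0).filterMap (fun p => if p.2 = c then some p.1 else none)

-- pos[-1] - pos[0] - 1; pos is nonempty for every c the outer loop visits, so pyGetD is exact
def pvGap (l : List Char) (c : Char) : Int :=
  PySem.List.pyGetD (pvPositions l c) (-1) 0 - PySem.List.pyGetD (pvPositions l c) 0 0 - 1

def maximumChars_alt (str1 : String) : Int :=
  (PySem.List.dedup str1.toList).foldl (fun res c => max res (pvGap str1.toList c)) 0

-- ===== PRECONDITION & SPEC =====
def Spec_maximumChars (str1 : String) (out : Int) : Prop := out = maximumChars_alt str1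
instance (str1 : String) (out : Int) : Decidable (Spec_maximumChars str1 out) := by unfold Spec_maximumChars; infer_instance

-- ===== CLAIM (what is proved, stated in full; the proofs are below) =====
def Claim_equal_maximumChars : Prop := ∀ (str1 : String), Dom_maximumChars str1 → Spec_maximumChars str1 (maximumChars str1)

-- ===== LEMMAS AND PROOFS =====

lemma pvChar_toNat_inj {c c' : Char} (h : c.toNat = c'.toNat) : c = c' :=
  Char.ext (UInt32.toNat_inj.mp h)

-- every collected position lies in [0, l.length)
lemma pvPositions_bounds (l : List Char) (c : Char) :
    ∀ i ∈ pvPositions l c, 0 ≤ i ∧ i < (l.length : Int) := by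
  intro i hi
  unfold pvPositions at hi
  obtain ⟨p, hp, hpe⟩ := List.mem_filterMap.mp hi
  obtain ⟨k, hk, rfl⟩ := (PySem.List.mem_enumerate_iff l 0 p).mp hp
  by_cases h : l[k] = c
  · simp only [h] at hpe
    cases hpe
    constructor <;> [positivity; exact_mod_cast by omega]
  · simp [h] at hpe

lemma pvPositions_eq_nil_of_not_mem {l : List Char} {c : Char} (h : c ∉ l) :
    pvPositions l c = [] := by
  unfold pvPositions
  apply List.filterMap_eq_nil_iff.mpr
  intro p hp
  obtain ⟨k, hk, rfl⟩ := (PySem.List.mem_enumerate_iff l 0 p).mp hp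
  have : l[k] ≠ c := fun hc => h (hc ▸ l.getElem_mem hk)
  simp [this]

lemma pvPositions_ne_nil_of_mem {l : List Char} {c : Char} (h : c ∈ l) :
    pvPositions l c ≠ [] := by
  obtain ⟨k, hk, rfl⟩ := List.getElem_of_mem h
  have : ((k : Int)) ∈ pvPositions l l[k] := by
    unfold pvPositions
    exact List.mem_filterMap.mpr ⟨((0 : Int) + k, l[k]),
      (PySem.List.mem_enumerate_iff l 0 _).mpr ⟨k, hk, rfl⟩, by simp⟩
  intro hnil
  rw [hnil] at this
  exact List.not_mem_nil this

-- appending one character appends (at most) one position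
lemma pvPositions_append (l : List Char) (x c : Char) :
    pvPositions (l ++ [x]) c =
      pvPositions l c ++ (if x = c then [(l.length : Int)] else []) := by
  unfold pvPositions
  rw [PySem.List.enumerate_append, List.filterMap_append]
  congr 1
  by_cases hxc : x = c <;>
    simp [PySem.List.enumerate_cons, PySem.List.enumerate_nil, hxc]

-- the head position is unchanged by appending when there already is one
lemma pvHead_append {pos : List Int} (h : pos ≠ []) (ys : List Int) :
    PySem.List.pyGetD (pos ++ ys) 0 0 = PySem.List.pyGetD pos 0 0 := by
  cases pos with
  | nil => exact absurd rfl h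
  | cons a t => simp [PySem.List.pyGetD_zero_cons]

-- a running max of a projection, with a max folded into the accumulator
lemma pvFoldMax_max (g : Char → Int) :
    ∀ (ks : List Char) (a b : Int),
      ks.foldl (fun r k => max r (g k)) (max a b) =
        max (ks.foldl (fun r k => max r (g k)) a) b := by
  intro ks
  induction ks with
  | nil => intro a b; rfl
  | cons k t ih =>
    intro a b
    simp only [List.foldl_cons]
    rw [max_right_comm a b (g k), ih]

-- updating one key (present once) of the projection to a no-smaller value
-- turns the running max into 'max (old fold) (new value)'
lemma pvFoldMax_update (g g' : Char → Int) (c : Char) :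
    ∀ (ks : List Char) (a : Int), c ∈ ks → ks.Nodup →
      (∀ k ∈ ks, k ≠ c → g' k = g k) → g c ≤ g' c →
      ks.foldl (fun r k => max r (g' k)) a =
        max (ks.foldl (fun r k => max r (g k)) a) (g' c) := by
  intro ks
  induction ks with
  | nil => intro a hm; simp at hm
  | cons y t ih =>
    intro a hm hnd hne hle
    rw [List.nodup_cons] at hnd
    rcases List.mem_cons.mp hm with hp | hp
    · subst hp
      have ht : ∀ q ∈ t, q ≠ c := fun q hq hqc => hnd.1 (hqc ▸ hq)
      have hcongr : t.foldl (fun r q => max r (g' q)) (max a (g' c)) =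
          t.foldl (fun r q => max r (g q)) (max a (g' c)) :=
        PySem.List.foldl_congr_mem t _ _ _
          (fun acc q hq => by rw [hne q (List.mem_cons_of_mem _ hq) (ht q hq)])
      simp only [List.foldl_cons]
      rw [hcongr, pvFoldMax_max, pvFoldMax_max]
      rw [max_assoc, max_eq_right hle]
    · have hk : y ≠ c := fun hkc => hnd.1 (hkc ▸ hp)
      simp only [List.foldl_cons]
      rw [hne y List.mem_cons_self hk]
      exact ih _ hp hnd.2 (fun q hq => hne q (List.mem_cons_of_mem _ hq)) hle

-- list(dict.fromkeys(..)) after appending one element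
lemma pvDedup_append (l : List Char) (x : Char) :
    PySem.List.dedup (l ++ [x]) =
      if x ∈ l then PySem.List.dedup l else PySem.List.dedup l ++ [x] := by
  simp only [PySem.List.dedup_eq_ofList, PySem.Set.ofList_eq_foldl, List.foldl_append,
    List.foldl_cons, List.foldl_nil]
  rw [← PySem.Set.ofList_eq_foldl]
  show PySem.Set.add (PySem.Set.ofList l) x = _
  unfold PySem.Set.add
  by_cases hx : x ∈ l
  · rw [if_pos (PySem.Set.contains_iff _ _ |>.mpr ((PySem.Set.mem_ofList l x).mpr hx)), if_pos hx]
  · rw [if_neg (fun hc => hx ((PySem.Set.mem_ofList l x).mp (PySem.Set.contains_iff _ _ |>.mp hc))),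
      if_neg hx]

-- the head position is unchanged by appending one character when there already is one
lemma pvFirst_append_of_mem {l : List Char} {c : Char} (x : Char) (h : c ∈ l) :
    PySem.List.pyGetD (pvPositions (l ++ [x]) c) 0 0 =
      PySem.List.pyGetD (pvPositions l c) 0 0 := by
  rw [pvPositions_append]
  by_cases hxc : x = c
  · rw [if_pos hxc, pvHead_append (pvPositions_ne_nil_of_mem h)]
  · rw [if_neg hxc, List.append_nil]

-- the main induction (on the string from the right): after processing l, the table holds each
-- character's first position (or -1) and res equals B's fold over the distinct characters
lemma pv_main : ∀ (l : List Char), (∀ c ∈ l, c.toNat < 256) →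
    ((PySem.List.enumerate l 0).foldl pvStepA (List.replicate 256 (-1), 0)).1.length = 256 ∧
    (∀ c : Char, c.toNat < 256 →
      ((PySem.List.enumerate l 0).foldl pvStepA (List.replicate 256 (-1), 0)).1.getD c.toNat (-1) =
        (if c ∈ l then PySem.List.pyGetD (pvPositions l c) 0 0 else -1)) ∧
    ((PySem.List.enumerate l 0).foldl pvStepA (List.replicate 256 (-1), 0)).2 =
      (PySem.List.dedup l).foldl (fun r c => max r (pvGap l c)) 0 := by
  intro l
  induction l using List.reverseRecOn with
  | nil =>
    refine fun _ => ⟨?_, ?_, by simp only [PySem.List.enumerate_nil, List.foldl_nil]; rfl⟩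
    · simp only [PySem.List.enumerate_nil, List.foldl_nil]
      exact List.length_replicate
    intro c _
    simp only [PySem.List.enumerate_nil, List.foldl_nil]
    rw [List.getD_eq_getElem?_getD, List.getElem?_replicate]
    split <;> simp
  | append_singleton l x ih =>
    intro hl
    obtain ⟨hlen, htab, hres⟩ := ih (fun c hc => hl c (List.mem_append_left _ hc))
    have hx256 : x.toNat < 256 := hl x (List.mem_append_right _ List.mem_cons_self)
    set st := (PySem.List.enumerate l 0).foldl pvStepA (List.replicate 256 (-1), 0) with hst
    have hfold : (PySem.List.enumerate (l ++ [x]) 0).foldl pvStepA (List.replicate 256 (-1), 0) =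
        pvStepA st ((l.length : Int), x) := by
      rw [PySem.List.enumerate_append, List.foldl_append, ← hst]
      simp [PySem.List.enumerate_cons]
    by_cases hmem : x ∈ l
    · -- repeated character: table untouched, res folds in the new gap of x
      have hpos_ne := pvPositions_ne_nil_of_mem hmem
      have hposlen : 0 < (pvPositions l x).length := List.length_pos_iff.mpr hpos_ne
      have hfx : st.1.getD x.toNat (-1) = PySem.List.pyGetD (pvPositions l x) 0 0 := by
        rw [htab x hx256, if_pos hmem]
      have hposlen' : (1 : Int) ≤ (pvPositions l x).length := by exact_mod_cast hposlen
      have hf_mem : PySem.List.pyGetD (pvPositions l x) 0 0 ∈ pvPositions l x :=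
        PySem.List.pyGetD_mem _ _ ⟨by omega, by omega⟩
      obtain ⟨hf0, hfn⟩ := pvPositions_bounds l x _ hf_mem
      have hstep : pvStepA st ((l.length : Int), x) =
          (st.1, max st.2 ((l.length : Int) - PySem.List.pyGetD (pvPositions l x) 0 0 - 1)) := by
        unfold pvStepA
        rw [hfx, if_neg (by omega), abs_of_nonneg (by omega)]
      have hgap_other : ∀ k ∈ PySem.List.dedup l, k ≠ x → pvGap (l ++ [x]) k = pvGap l k := by
        intro k _ hk
        unfold pvGap
        rw [pvPositions_append, if_neg (fun h => hk h.symm), List.append_nil]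
      have hgap_x : pvGap (l ++ [x]) x =
          (l.length : Int) - PySem.List.pyGetD (pvPositions l x) 0 0 - 1 := by
        unfold pvGap
        rw [pvPositions_append, if_pos rfl, PySem.List.pyGetD_neg_one_append_singleton,
          pvHead_append hpos_ne]
      have hgap_le : pvGap l x ≤ pvGap (l ++ [x]) x := by
        rw [hgap_x]
        unfold pvGap
        have hl_mem : PySem.List.pyGetD (pvPositions l x) (-1) 0 ∈ pvPositions l x :=
          PySem.List.pyGetD_mem _ _ ⟨by omega, by omega⟩
        obtain ⟨_, hln⟩ := pvPositions_bounds l x _ hl_mem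
        omega
      refine ⟨by rw [hfold, hstep]; exact hlen, ?_, ?_⟩
      · intro c hc
        rw [hfold, hstep]
        show st.1.getD c.toNat (-1) = _
        rw [htab c hc]
        by_cases hcl : c ∈ l
        · rw [if_pos hcl, if_pos (List.mem_append_left _ hcl), pvFirst_append_of_mem x hcl]
        · have hcx : c ≠ x := fun h => hcl (h ▸ hmem)
          rw [if_neg hcl, if_neg (by simp [hcl, hcx])]
      · rw [hfold, hstep]
        show max st.2 _ = _
        rw [hres, pvDedup_append, if_pos hmem,
          pvFoldMax_update (pvGap l) (pvGap (l ++ [x])) x (PySem.List.dedup l) 0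
            ((PySem.List.mem_dedup l x).mpr hmem) (PySem.List.nodup_dedup l)
            hgap_other hgap_le, hgap_x]
    · -- first occurrence: table records l.length at x, res unchanged
      have hposx : pvPositions (l ++ [x]) x = [(l.length : Int)] := by
        rw [pvPositions_append, if_pos rfl, pvPositions_eq_nil_of_not_mem hmem, List.nil_append]
      have hfx : st.1.getD x.toNat (-1) = -1 := by rw [htab x hx256, if_neg hmem]
      have hstep : pvStepA st ((l.length : Int), x) =
          (st.1.set x.toNat (l.length : Int), st.2) := by
        unfold pvStepA
        rw [hfx, if_pos rfl]
      have hgap_other : ∀ k ∈ PySem.List.dedup l, pvGap (l ++ [x]) k = pvGap l k := by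
        intro k hk
        have hkx : x ≠ k := fun h => hmem (h ▸ (PySem.List.mem_dedup l k).mp hk)
        unfold pvGap
        rw [pvPositions_append, if_neg hkx, List.append_nil]
      have hgap_x : pvGap (l ++ [x]) x = -1 := by
        unfold pvGap
        rw [hposx]
        simp [PySem.List.pyGetD, PySem.List.pyGet?, PySem.List.pyIdx?]
      refine ⟨by rw [hfold, hstep]; simpa using hlen, ?_, ?_⟩
      · intro c hc
        rw [hfold, hstep]
        show (st.1.set x.toNat (l.length : Int)).getD c.toNat (-1) = _
        by_cases hcx : c = x
        · subst hcx
          rw [if_pos (List.mem_append_right _ List.mem_cons_self), hposx,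
            PySem.List.pyGetD_zero_cons]
          rw [List.getD_eq_getElem?_getD, List.getElem?_set_self (by omega)]
          rfl
        · have htn : x.toNat ≠ c.toNat := fun h => hcx (pvChar_toNat_inj h).symm
          rw [List.getD_eq_getElem?_getD, List.getElem?_set_ne htn,
            ← List.getD_eq_getElem?_getD, htab c hc]
          by_cases hcl : c ∈ l
          · rw [if_pos hcl, if_pos (List.mem_append_left _ hcl), pvFirst_append_of_mem x hcl]
          · rw [if_neg hcl, if_neg (by simp [hcl, hcx])]
      · rw [hfold, hstep]
        show st.2 = _
        have hcongr : (PySem.List.dedup l).foldl (fun r c => max r (pvGap (l ++ [x]) c)) 0 =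
            (PySem.List.dedup l).foldl (fun r c => max r (pvGap l c)) 0 :=
          PySem.List.foldl_congr_mem _ _ _ _ (fun acc k hk => by rw [hgap_other k hk])
        rw [hres, pvDedup_append, if_neg hmem, List.foldl_append, List.foldl_cons, List.foldl_nil,
          hcongr, hgap_x]
        have h0 : (0 : Int) ≤ (PySem.List.dedup l).foldl (fun r c => max r (pvGap l c)) 0 :=
          (PySem.List.le_foldl_max_int (PySem.List.dedup l) (pvGap l) 0).1
        omega

-- ===== VERDICT (by name: the statement is the Claim_ definition above) =====
theorem maximumChars_spec : Claim_equal_maximumChars := by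
  intro str1 hdom
  unfold Spec_maximumChars maximumChars maximumChars_alt
  have hchars : ∀ c ∈ str1.toList, c.toNat < 256 := by
    intro c hc
    have := List.all_eq_true.mp hdom c hc
    simp only [pvDomChar, Bool.or_eq_true, Bool.and_eq_true, decide_eq_true_eq, beq_iff_eq] at this
    omega
  exact (pv_main str1.toList hchars).2.2
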